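-- pv_equiv track=rewrite | github.com/palyuga/porting-tool | port/cli.py | _derive_new_branch_name
-- ===== SOURCE A (Python) =====
-- def _derive_new_branch_name(
--     source_branch: str, target_alias: str, known_aliases: list[str]
-- ) -> str:
--     """Replace or append the target alias on the source branch name.
--
--     If the source branch already ends with a known alias (e.g. -156),
--     replace it with the target alias. Otherwise append it.
--
--     e.g. bugfix/jira-7777-fix-156 + 176 -> bugfix/jira-7777-fix-176
--          bugfix/jira-7777-fix     + 168 -> bugfix/jira-7777-fix-168
--     """
--     for alias in sorted(known_aliases, key=len, reverse=True):
--         suffix = f"-{alias}"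
--         if source_branch.endswith(suffix):
--             return source_branch[: -len(suffix)] + f"-{target_alias}"
--     return f"{source_branch}-{target_alias}"
-- ===== SOURCE B (Python) =====
-- def _derive_new_branch_name(
--     source_branch: str, target_alias: str, known_aliases: list[str]
-- ) -> str:
--     """Replace or append the target alias on the source branch name.
--
--     One pass over known_aliases tracking the longest alias that the
--     branch name ends with (no sorting).
--     """
--     best = None
--     for alias in known_aliases:
--         if source_branch.endswith(f"-{alias}") and (
--             best is None or len(alias) > len(best)
--         ):
--             best = alias
--     if best is None:
--         return f"{source_branch}-{target_alias}"
--     return source_branch[: -(len(best) + 1)] + f"-{target_alias}"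
-- ===== Notes on version B (the rewrite author's own statement) =====
-- stated objective: simpler
-- what changed: replaces sort-by-length-descending-then-return-first-match with a single unsorted scan that tracks the longest matching alias and builds the result afterwards
import Mathlib
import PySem

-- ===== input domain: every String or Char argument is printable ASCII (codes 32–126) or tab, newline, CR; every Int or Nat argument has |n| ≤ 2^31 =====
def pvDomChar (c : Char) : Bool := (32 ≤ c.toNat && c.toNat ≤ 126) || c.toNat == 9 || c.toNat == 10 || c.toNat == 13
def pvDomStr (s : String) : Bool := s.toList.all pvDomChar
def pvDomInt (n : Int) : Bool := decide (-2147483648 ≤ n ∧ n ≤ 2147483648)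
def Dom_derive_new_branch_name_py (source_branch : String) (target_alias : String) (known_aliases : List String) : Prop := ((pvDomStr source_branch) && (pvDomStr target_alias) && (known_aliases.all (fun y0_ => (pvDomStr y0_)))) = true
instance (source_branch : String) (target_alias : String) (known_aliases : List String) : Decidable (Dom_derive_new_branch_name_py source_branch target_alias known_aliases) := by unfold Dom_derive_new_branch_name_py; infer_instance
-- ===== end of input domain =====

-- B replaces A's sort-by-length-descending-then-first-match with a single unsorted
-- scan tracking the longest matching alias (objective: simpler).

-- ===== PORT A =====
-- the for-loop over sorted(known_aliases, key=len, reverse=True): return on first match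
def pvALoop (s t : List Char) : List String → String
  | [] => String.mk (s ++ '-' :: t)                                    -- f"{source_branch}-{target_alias}"
  | a :: rest =>
    let suffix := '-' :: a.toList                                      -- f"-{alias}"
    if PySem.Chars.endswith s suffix then
      String.mk (PySem.List.slice s none (some (-(suffix.length : Int))) ++ '-' :: t)  -- source_branch[:-len(suffix)] + f"-{target_alias}"
    else pvALoop s t rest

def derive_new_branch_name_py (source_branch : String) (target_alias : String) (known_aliases : List String) : String :=
  pvALoop source_branch.toList target_alias.toList
    (PySem.List.sorted known_aliases (fun a => PySem.Str.len a) true)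

-- ===== PORT B =====
-- one step of the scan: keep the alias if it matches and is strictly longer than the best so far
def pvBStep (s : List Char) (best : Option String) (a : String) : Option String :=
  if PySem.Chars.endswith s ('-' :: a.toList)
      && (match best with
          | none => true
          | some b => decide (b.toList.length < a.toList.length)) then
    some a
  else best

def derive_new_branch_name_py_alt (source_branch : String) (target_alias : String) (known_aliases : List String) : String :=
  match known_aliases.foldl (pvBStep source_branch.toList) none with
  | none => String.mk (source_branch.toList ++ '-' :: target_alias.toList)
  | some b => String.mk (source_branch.toList.take (source_branch.toList.length - (b.toList.length + 1)) ++ '-' :: target_alias.toList)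

-- ===== PRECONDITION & SPEC =====
def Spec_derive_new_branch_name_py (source_branch : String) (target_alias : String) (known_aliases : List String) (out : String) : Prop := out = derive_new_branch_name_py_alt source_branch target_alias known_aliases
instance (source_branch : String) (target_alias : String) (known_aliases : List String) (out : String) : Decidable (Spec_derive_new_branch_name_py source_branch target_alias known_aliases out) := by unfold Spec_derive_new_branch_name_py; infer_instance

-- ===== CLAIM (what is proved, stated in full; the proofs are below) =====
def Claim_equal_derive_new_branch_name_py : Prop := ∀ (source_branch : String) (target_alias : String) (known_aliases : List String), Dom_derive_new_branch_name_py source_branch target_alias known_aliases → Spec_derive_new_branch_name_py source_branch target_alias known_aliases (derive_new_branch_name_py source_branch target_alias known_aliases)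

-- ===== LEMMAS AND PROOFS =====

-- the running maximum of the lengths of matching aliases (none = no match yet)
def pvMaxStep (s : List Char) (m : Option Nat) (a : String) : Option Nat :=
  if PySem.Chars.endswith s ('-' :: a.toList) then some (max (m.getD 0) a.length) else m

def pvMaxm (s : List Char) (l : List String) : Option Nat := l.foldl (pvMaxStep s) none

-- the common output, determined solely by the optional best matching length
def pvOut (s t : List Char) : Option Nat → String
  | none => String.mk (s ++ '-' :: t)
  | some n => String.mk (s.take (s.length - (n + 1)) ++ '-' :: t)

theorem pvBStep_len (s : List Char) (acc : Option String) (a : String) :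
    (pvBStep s acc a).map String.length = pvMaxStep s (acc.map String.length) a := by
  cases acc with
  | none =>
    simp only [pvBStep, pvMaxStep]
    cases h : PySem.Chars.endswith s ('-' :: a.toList) <;> simp [h]
  | some b =>
    simp only [pvBStep, pvMaxStep]
    cases h : PySem.Chars.endswith s ('-' :: a.toList) with
    | false => simp [h]
    | true =>
      simp only [String.length_toList] at *
      by_cases hl : b.length < a.length <;>
        simp [hl] <;> omega

theorem pvB_fold_len (s : List Char) (l : List String) :
    ∀ acc : Option String,
      ((l.foldl (pvBStep s) acc).map String.length)
        = l.foldl (pvMaxStep s) (acc.map String.length) := by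
  induction l with
  | nil => intro acc; rfl
  | cons a rest ih =>
    intro acc
    simp only [List.foldl_cons, ih (pvBStep s acc a), pvBStep_len]

theorem pvB_eq_out (sb ta : String) (ka : List String) :
    derive_new_branch_name_py_alt sb ta ka = pvOut sb.toList ta.toList (pvMaxm sb.toList ka) := by
  have h := pvB_fold_len sb.toList ka none
  simp only [Option.map_none] at h
  unfold derive_new_branch_name_py_alt pvMaxm
  cases hf : ka.foldl (pvBStep sb.toList) none with
  | none => rw [hf] at h; simp only [Option.map_none] at h; rw [← h]; rfl
  | some b =>
    rw [hf] at h; simp only [Option.map_some] at h; rw [← h]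
    simp [pvOut, String.length_toList]

theorem pvMax_fold_const (s : List Char) (l : List String) (v : Nat)
    (h : ∀ x ∈ l, x.length ≤ v) :
    l.foldl (pvMaxStep s) (some v) = some v := by
  induction l with
  | nil => rfl
  | cons a rest ih =>
    simp only [List.foldl_cons]
    have ha : a.length ≤ v := h a (by simp)
    have hstep : pvMaxStep s (some v) a = some v := by
      unfold pvMaxStep
      cases he : PySem.Chars.endswith s ('-' :: a.toList) <;> simp
      omega
    rw [hstep]
    exact ih (fun x hx => h x (by simp [hx]))

theorem pvALoop_eq_out (s t : List Char) (l : List String)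
    (hp : l.Pairwise (fun a b => b.length ≤ a.length)) :
    pvALoop s t l = pvOut s t (pvMaxm s l) := by
  induction l with
  | nil => rfl
  | cons a rest ih =>
    rcases List.pairwise_cons.mp hp with ⟨hhead, htail⟩
    unfold pvALoop pvMaxm
    simp only [List.foldl_cons]
    cases he : PySem.Chars.endswith s ('-' :: a.toList) with
    | false =>
      simp only [Bool.false_eq_true, if_false]
      have hstep : pvMaxStep s none a = none := by simp [pvMaxStep, he]
      rw [hstep]
      exact ih htail
    | true =>
      simp only [if_true]
      have hstep : pvMaxStep s none a = some a.length := by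
        simp [pvMaxStep, he]
      rw [hstep, pvMax_fold_const s rest _ hhead]
      unfold pvOut
      congr 1
      have hk : 0 < ('-' :: a.toList).length := by simp
      rw [PySem.List.slice_to_neg_natCast s ('-' :: a.toList).length hk]
      simp [String.length_toList]

theorem pvMaxStep_rightComm (s : List Char) :
    ∀ (m : Option Nat) (a b : String),
      pvMaxStep s (pvMaxStep s m a) b = pvMaxStep s (pvMaxStep s m b) a := by
  intro m a b
  unfold pvMaxStep
  cases ha : PySem.Chars.endswith s ('-' :: a.toList) <;>
    cases hb : PySem.Chars.endswith s ('-' :: b.toList) <;>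
      cases m <;> simp <;> omega

theorem pvMaxm_perm (s : List Char) {l l' : List String} (h : l.Perm l') :
    pvMaxm s l = pvMaxm s l' := by
  unfold pvMaxm
  exact @List.Perm.foldl_eq _ _ (pvMaxStep s) _ _ ⟨pvMaxStep_rightComm s⟩ h none

theorem pvSorted_pairwise (ka : List String) :
    (PySem.List.sorted ka (fun a => PySem.Str.len a) true).Pairwise
      (fun a b => b.length ≤ a.length) := by
  have h := PySem.List.sorted_pairwise_rev (xs := ka) (key := fun a => PySem.Str.len a)
  refine h.imp ?_
  intro a b hab
  simpa [PySem.Str.len_eq, String.length_toList] using hab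

-- ===== VERDICT (by name: the statement is the Claim_ definition above) =====
theorem derive_new_branch_name_py_spec : Claim_equal_derive_new_branch_name_py := by
  intro sb ta ka _
  unfold Spec_derive_new_branch_name_py
  rw [pvB_eq_out]
  unfold derive_new_branch_name_py
  rw [pvALoop_eq_out _ _ _ (pvSorted_pairwise ka),
      pvMaxm_perm sb.toList (PySem.List.sorted_perm ka (fun a => PySem.Str.len a) true)]
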